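-- pv_equiv track=rewrite | github.com/fabiansato/Python-Ejercicios | clase 13/2parcial/bariloche.py | bariloche
-- ===== SOURCE A (Python) =====
-- def bariloche(listaTuristas, listaEstadia):
--     listaContadora=[0,0,0,0]
--     for elemento in listaEstadia:
--         if elemento<7:
--             listaContadora[0]+=1
--         elif elemento >=7 and elemento <=15:
--             listaContadora[1]+=1
--         elif elemento >15 and elemento <=30:
--             listaContadora[2]+=1
--         else:
--             listaContadora[3]+=1
--     return listaContadora
-- ===== SOURCE B (Python) =====
-- from bisect import bisect_left, bisect_right
--
-- def bariloche(listaTuristas, listaEstadia):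
--     s = sorted(listaEstadia)
--     i7 = bisect_left(s, 7)
--     i15 = bisect_right(s, 15)
--     i30 = bisect_right(s, 30)
--     return [i7, i15 - i7, i30 - i15, len(s) - i30]
-- ===== Notes on version B (the rewrite author's own statement) =====
-- stated objective: alternative
-- what changed: Replaces the single branching counting loop with sort + three binary-search boundary positions (bisect_left at 7, bisect_right at 15 and 30); the four bucket counts are differences of those indices.
import Mathlib
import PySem

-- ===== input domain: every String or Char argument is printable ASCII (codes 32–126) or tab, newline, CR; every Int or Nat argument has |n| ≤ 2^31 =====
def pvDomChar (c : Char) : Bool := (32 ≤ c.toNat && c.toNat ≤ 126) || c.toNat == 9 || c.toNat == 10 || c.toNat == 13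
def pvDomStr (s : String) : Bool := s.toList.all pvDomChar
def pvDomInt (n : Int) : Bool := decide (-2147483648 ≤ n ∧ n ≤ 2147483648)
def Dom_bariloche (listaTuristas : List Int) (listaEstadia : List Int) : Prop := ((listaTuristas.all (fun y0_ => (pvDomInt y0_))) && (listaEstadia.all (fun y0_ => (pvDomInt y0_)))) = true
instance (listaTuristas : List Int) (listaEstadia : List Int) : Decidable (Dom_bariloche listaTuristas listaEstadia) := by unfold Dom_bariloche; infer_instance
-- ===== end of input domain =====

-- B replaces A's single branching counting loop by sort + binary-search boundary indices (alternative decomposition, not claimed faster).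


-- ===== PORT A =====
-- the four counters of listaContadora, updated exactly as A's if/elif chain does
def barilocheStep (c : Int × Int × Int × Int) (elemento : Int) : Int × Int × Int × Int :=
  if elemento < 7 then (c.1 + 1, c.2.1, c.2.2.1, c.2.2.2)
  else if 7 ≤ elemento ∧ elemento ≤ 15 then (c.1, c.2.1 + 1, c.2.2.1, c.2.2.2)
  else if 15 < elemento ∧ elemento ≤ 30 then (c.1, c.2.1, c.2.2.1 + 1, c.2.2.2)
  else (c.1, c.2.1, c.2.2.1, c.2.2.2 + 1)

def bariloche (listaTuristas : List Int) (listaEstadia : List Int) : List Int :=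
  let c := listaEstadia.foldl barilocheStep (0, 0, 0, 0)
  [c.1, c.2.1, c.2.2.1, c.2.2.2]

-- ===== PORT B =====
def bariloche_alt (listaTuristas : List Int) (listaEstadia : List Int) : List Int :=
  let s := PySem.List.sorted listaEstadia (fun x => x) false
  let i7 := PySem.List.bisectLeft s (7 : Int)
  let i15 := PySem.List.bisectRight s (15 : Int)
  let i30 := PySem.List.bisectRight s (30 : Int)
  [(i7 : Int), (i15 : Int) - (i7 : Int), (i30 : Int) - (i15 : Int), (s.length : Int) - (i30 : Int)]

-- ===== PRECONDITION & SPEC =====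
def Spec_bariloche (listaTuristas : List Int) (listaEstadia : List Int) (out : List Int) : Prop := out = bariloche_alt listaTuristas listaEstadia
instance (listaTuristas : List Int) (listaEstadia : List Int) (out : List Int) : Decidable (Spec_bariloche listaTuristas listaEstadia out) := by unfold Spec_bariloche; infer_instance

-- ===== CLAIM (what is proved, stated in full; the proofs are below) =====
def Claim_equal_bariloche : Prop := ∀ (listaTuristas : List Int) (listaEstadia : List Int), Dom_bariloche listaTuristas listaEstadia → Spec_bariloche listaTuristas listaEstadia (bariloche listaTuristas listaEstadia)

-- ===== LEMMAS AND PROOFS =====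

-- A's fold computes the countP of the four disjoint bucket predicates.
theorem bariloche_fold_countP (l : List Int) :
    l.foldl barilocheStep (0, 0, 0, 0) =
      ((l.countP (fun e => decide (e < 7)) : Int),
       (l.countP (fun e => decide (7 ≤ e ∧ e ≤ 15)) : Int),
       (l.countP (fun e => decide (15 < e ∧ e ≤ 30)) : Int),
       (l.countP (fun e => decide (30 < e)) : Int)) := by
  induction l using List.reverseRecOn with
  | nil => simp
  | append_singleton t e ih =>
      simp only [List.foldl_append, List.foldl_cons, List.foldl_nil, ih, List.countP_append,
        List.countP_cons, List.countP_nil, barilocheStep]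
      split_ifs with h1 h2 h3 <;>
        simp_all <;> omega

-- a predicate holding exactly on the first k indices has countP k
theorem countP_of_prefix (s : List Int) (p : Int → Bool) (k : Nat) (hk : k ≤ s.length)
    (h1 : ∀ (j : Nat) (hj : j < s.length), j < k → p s[j] = true)
    (h2 : ∀ (j : Nat) (hj : j < s.length), k ≤ j → p s[j] = false) :
    s.countP p = k := by
  have hsplit : s = s.take k ++ s.drop k := (List.take_append_drop k s).symm
  rw [hsplit, List.countP_append]
  have htake : (s.take k).countP p = (s.take k).length := by
    rw [List.countP_eq_length]
    intro x hx
    obtain ⟨j, hj, rfl⟩ := List.mem_take_iff_getElem.mp hx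
    exact h1 j (by omega) (by omega)
  have hdrop : (s.drop k).countP p = 0 := by
    rw [List.countP_eq_zero]
    intro x hx
    obtain ⟨j, hj, rfl⟩ := List.mem_drop_iff_getElem.mp hx
    simp [h2 (k + j) (by omega) (by omega)]
  rw [htake, hdrop, List.length_take]
  omega

theorem bisectLeft_eq_countP (l : List Int) (x : Int) :
    PySem.List.bisectLeft (PySem.List.sorted l (fun y => y) false) x =
      l.countP (fun e => decide (e < x)) := by
  set s := PySem.List.sorted l (fun y => y) false with hs
  have hpw : s.Pairwise (fun a b => a ≤ b) := PySem.List.sorted_pairwise l (fun y => y)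
  obtain ⟨hle, h1, h2⟩ := PySem.List.bisectLeft_spec s x hpw
  have hperm : s.Perm l := PySem.List.sorted_perm l (fun y => y) false
  rw [← hperm.countP_eq]
  exact (countP_of_prefix s _ _ hle
    (fun j hj hlt => by simp [h1 j hj hlt])
    (fun j hj hge => by simp [h2 j hj hge])).symm

theorem bisectRight_eq_countP (l : List Int) (x : Int) :
    PySem.List.bisectRight (PySem.List.sorted l (fun y => y) false) x =
      l.countP (fun e => decide (e ≤ x)) := by
  set s := PySem.List.sorted l (fun y => y) false with hs
  have hpw : s.Pairwise (fun a b => a ≤ b) := PySem.List.sorted_pairwise l (fun y => y)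
  obtain ⟨hle, h1, h2⟩ := PySem.List.bisectRight_spec s x hpw
  have hperm : s.Perm l := PySem.List.sorted_perm l (fun y => y) false
  rw [← hperm.countP_eq]
  exact (countP_of_prefix s _ _ hle
    (fun j hj hlt => by simp [h1 j hj hlt])
    (fun j hj hge => by simp [h2 j hj hge])).symm

-- boundary-count identities between the disjoint buckets and the cumulative predicates
theorem count_split15 (l : List Int) :
    l.countP (fun e => decide (e ≤ 15)) =
      l.countP (fun e => decide (e < 7)) + l.countP (fun e => decide (7 ≤ e ∧ e ≤ 15)) := by
  induction l with
  | nil => simp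
  | cons e t ih => simp only [List.countP_cons, ih]; split_ifs <;> simp_all <;> omega

theorem count_split30 (l : List Int) :
    l.countP (fun e => decide (e ≤ 30)) =
      l.countP (fun e => decide (e ≤ 15)) + l.countP (fun e => decide (15 < e ∧ e ≤ 30)) := by
  induction l with
  | nil => simp
  | cons e t ih => simp only [List.countP_cons, ih]; split_ifs <;> simp_all <;> omega

theorem count_splitLen (l : List Int) :
    l.length = l.countP (fun e => decide (e ≤ 30)) + l.countP (fun e => decide (30 < e)) := by
  induction l with
  | nil => simp
  | cons e t ih => simp only [List.countP_cons, List.length_cons, ih]; split_ifs <;> simp_all <;> omega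

-- ===== VERDICT (by name: the statement is the Claim_ definition above) =====
theorem bariloche_spec : Claim_equal_bariloche := by
  intro lT lE _
  unfold Spec_bariloche bariloche bariloche_alt
  simp only [bariloche_fold_countP, bisectLeft_eq_countP, bisectRight_eq_countP,
    PySem.List.length_sorted]
  have h15 := count_split15 lE
  have h30 := count_split30 lE
  have hlen := count_splitLen lE
  simp only [List.cons.injEq, and_true]
  refine ⟨trivial, ?_, ?_, ?_⟩ <;> omega
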